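-- pv_equiv track=rewrite | github.com/mo-alrz/Functions | intvw2.py | solution
-- ===== SOURCE A (Python) =====
-- def solution(S):
--     N = len(S)
--     min_of_patches = 0
--
--     if 3 <= N < 10 ** 5 and all(elem == "." or elem == "X" for elem in S):
--
--         i = 0
--         while i < N:
--             if 'X' in S[i:i + 3]:
--                 min_of_patches += 1
--                 i += 3
--             else:
--                 i += 1
--
--         return min_of_patches
-- ===== SOURCE B (Python) =====
-- def solution(S):
--     N = len(S)
--     if 3 <= N < 10 ** 5 and all(elem == "." or elem == "X" for elem in S):
--         xs = [k for k, c in enumerate(S) if c == "X"]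
--         i = 0
--         count = 0
--         for p in xs:
--             if p >= i:
--                 i = max(i, p - 2) + 3
--                 count += 1
--         return count
-- ===== Notes on version B (the rewrite author's own statement) =====
-- stated objective: alternative
-- what changed: Replaces the per-position window scan (slicing S[i:i+3] at every index) with a precomputed list of X indices and a single jumping pass over that list with a coverage cursor i = max(i, p-2) + 3.
import Mathlib
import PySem

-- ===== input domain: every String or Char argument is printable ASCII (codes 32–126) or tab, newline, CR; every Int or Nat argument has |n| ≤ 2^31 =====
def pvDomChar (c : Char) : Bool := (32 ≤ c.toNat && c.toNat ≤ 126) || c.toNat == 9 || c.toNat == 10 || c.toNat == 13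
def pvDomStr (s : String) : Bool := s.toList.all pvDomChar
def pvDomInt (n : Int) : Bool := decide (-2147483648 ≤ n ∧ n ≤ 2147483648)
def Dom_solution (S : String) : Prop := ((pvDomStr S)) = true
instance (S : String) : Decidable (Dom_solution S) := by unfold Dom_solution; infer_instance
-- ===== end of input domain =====

-- B precomputes the list of X indices and does one jumping pass over it with a
-- coverage cursor, instead of A's per-position window scan; same guard, same result.

-- ===== PORT A =====
-- while i < N: if 'X' in S[i:i+3]: min_of_patches += 1; i += 3 else i += 1
def solLoopA (L : List Char) (i : Nat) (acc : Int) : Int :=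
  if _h : i < L.length then
    if 'X' ∈ PySem.List.slice L (some (i : Int)) (some ((i : Int) + 3)) then
      solLoopA L (i + 3) (acc + 1)
    else
      solLoopA L (i + 1) acc
  else acc
termination_by L.length - i

def solution (S : String) : Option Int :=
  let L := S.toList
  let N := L.length
  if 3 ≤ N ∧ N < 10 ^ 5 ∧ L.all (fun elem => elem == '.' || elem == 'X') then
    some (solLoopA L 0 0)
  else
    none

-- ===== PORT B =====
def solXs (L : List Char) : List Int :=
  ((PySem.List.enumerate L 0).filter (fun kc => kc.2 == 'X')).map (·.1)

def solution_alt (S : String) : Option Int :=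
  let L := S.toList
  let N := L.length
  if 3 ≤ N ∧ N < 10 ^ 5 ∧ L.all (fun elem => elem == '.' || elem == 'X') then
    let xs := solXs L
    some ((xs.foldl (fun (st : Int × Int) p =>
      if p ≥ st.1 then (max st.1 (p - 2) + 3, st.2 + 1) else st) (0, 0)).2)
  else
    none

-- ===== PRECONDITION & SPEC =====
def Spec_solution (S : String) (out : Option Int) : Prop := out = solution_alt S
instance (S : String) (out : Option Int) : Decidable (Spec_solution S out) := by unfold Spec_solution; infer_instance

-- ===== CLAIM (what is proved, stated in full; the proofs are below) =====
def Claim_equal_solution : Prop := ∀ (S : String), Dom_solution S → Spec_solution S (solution S)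

-- ===== LEMMAS AND PROOFS =====

-- additive version of B's fold, for the proofs
def solFB (i : Int) : List Int → Int
  | [] => 0
  | p :: ps => if p ≥ i then 1 + solFB (max i (p - 2) + 3) ps else solFB i ps

theorem solFB_foldl (xs : List Int) : ∀ (i c : Int),
    (xs.foldl (fun (st : Int × Int) p =>
      if p ≥ st.1 then (max st.1 (p - 2) + 3, st.2 + 1) else st) (i, c)).2
      = c + solFB i xs := by
  induction xs with
  | nil => intro i c; simp [solFB]
  | cons p ps ih =>
    intro i c
    by_cases h : p ≥ i
    · simp [List.foldl, solFB, h, ih]; ring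
    · simp [List.foldl, solFB, h, ih]

theorem solFB_skip_all {xs : List Int} {i : Int} (h : ∀ p ∈ xs, p < i) :
    solFB i xs = 0 := by
  induction xs with
  | nil => rfl
  | cons p ps ih =>
    have hp := h p (by simp)
    simp [solFB, not_le.mpr hp]
    exact ih (fun q hq => h q (by simp [hq]))

theorem solFB_step_empty {xs : List Int} {i : Int}
    (h : ∀ p ∈ xs, p < i ∨ i + 3 ≤ p) :
    solFB i xs = solFB (i + 1) xs := by
  induction xs generalizing i with
  | nil => rfl
  | cons p ps ih =>
    rcases h p (by simp) with hlt | hge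
    · simp [solFB, not_le.mpr hlt, not_le.mpr (by omega : p < i + 1)]
      exact ih (fun q hq => h q (by simp [hq]))
    · have h1 : p ≥ i := by omega
      have h2 : p ≥ i + 1 := by omega
      have hm : max i (p - 2) = p - 2 := by omega
      have hm2 : max (i + 1) (p - 2) = p - 2 := by omega
      simp [solFB, h1, h2, hm, hm2]

theorem solFB_step_hit {xs : List Int} (hs : xs.Pairwise (· < ·)) {i : Int}
    (h : ∃ p ∈ xs, i ≤ p ∧ p < i + 3) :
    solFB i xs = 1 + solFB (i + 3) xs := by
  induction xs generalizing i with
  | nil => simp at h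
  | cons p ps ih =>
    rw [List.pairwise_cons] at hs
    obtain ⟨hrel, htail⟩ := hs
    obtain ⟨q, hq, hq1, hq2⟩ := h
    by_cases hp : p ≥ i
    · -- head fires: p ≤ q < i+3, so max i (p-2) = i
      have hpq : p ≤ q := by
        rcases List.mem_cons.mp hq with rfl | hq'
        · omega
        · exact le_of_lt (hrel q hq')
      have hm : max i (p - 2) = i := by omega
      have hplt : ¬ p ≥ i + 3 := by omega
      simp [solFB, hp, hm, hplt]
    · -- head skipped on both sides; witness is in the tail
      have hq' : q ∈ ps := by
        rcases List.mem_cons.mp hq with rfl | hq'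
        · omega
        · exact hq'
      have hp3 : ¬ p ≥ i + 3 := by omega
      simp [solFB, hp, hp3]
      exact ih htail ⟨q, hq', hq1, hq2⟩

theorem solXs_mem (L : List Char) (p : Int) :
    p ∈ solXs L ↔ ∃ k : Nat, k < L.length ∧ p = (k : Int) ∧ L[k]? = some 'X' := by
  unfold solXs
  simp only [List.mem_map, List.mem_filter, PySem.List.mem_enumerate_iff]
  constructor
  · rintro ⟨⟨k', c⟩, ⟨⟨k, hk, heq⟩, hX⟩, rfl⟩
    cases heq
    refine ⟨k, hk, by simp, ?_⟩
    simp at hX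
    simp [List.getElem?_eq_getElem hk, hX]
  · rintro ⟨k, hk, rfl, hX⟩
    refine ⟨((k : Int), L[k]), ⟨⟨k, hk, by simp⟩, ?_⟩, rfl⟩
    simp [List.getElem?_eq_getElem hk] at hX
    simp [hX]

theorem solXs_sorted (L : List Char) : (solXs L).Pairwise (· < ·) := by
  unfold solXs
  apply List.Pairwise.map (R := fun p q : Int × Char => p.1 < q.1) _ (fun a b h => h)
  exact (PySem.List.pairwise_lt_enumerate L 0).filter _

-- 'X' in the window [i, i+3) iff some X index lies there
theorem solWindow_iff (L : List Char) (i : Nat) :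
    ('X' ∈ PySem.List.slice L (some (i : Int)) (some ((i : Int) + 3)))
      ↔ ∃ p ∈ solXs L, (i : Int) ≤ p ∧ p < (i : Int) + 3 := by
  have h3 : ((i : Int) + 3) = ((i : Int) + ((3 : Nat) : Int)) := by norm_num
  rw [h3, PySem.List.slice_natCast_add]
  constructor
  · intro hmem
    obtain ⟨j, hj, hget⟩ := List.getElem_of_mem hmem
    have hjlen : j < 3 := by
      have := hj; simp [List.length_take, List.length_drop] at this; omega
    have hidx : i + j < L.length := by
      have := hj; simp [List.length_take, List.length_drop] at this; omega
    have hX : L[i + j] = 'X' := by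
      have := hget
      rwa [List.getElem_take, List.getElem_drop] at this
    refine ⟨((i + j : Nat) : Int), ?_, by push_cast; omega, by push_cast; omega⟩
    rw [solXs_mem]
    exact ⟨i + j, hidx, rfl, by simp [List.getElem?_eq_getElem hidx, hX]⟩
  · rintro ⟨p, hp, hp1, hp2⟩
    rw [solXs_mem] at hp
    obtain ⟨k, hk, rfl, hX⟩ := hp
    have hik : i ≤ k ∧ k < i + 3 := by omega
    have hget : L[k] = 'X' := by
      simp [List.getElem?_eq_getElem hk] at hX; exact hX
    have hj : k - i < ((L.drop i).take 3).length := by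
      simp [List.length_take, List.length_drop]; omega
    have : ((L.drop i).take 3)[k - i] = 'X' := by
      rw [List.getElem_take, List.getElem_drop]
      have : i + (k - i) = k := by omega
      simp [this, hget]
    rw [← this]
    exact List.getElem_mem hj

-- every X index is below the length, so a cursor past the end skips everything
theorem solXs_lt_len (L : List Char) {i : Nat} (h : L.length ≤ i) :
    ∀ p ∈ solXs L, p < (i : Int) := by
  intro p hp
  rw [solXs_mem] at hp
  obtain ⟨k, hk, rfl, _⟩ := hp
  exact_mod_cast by omega

-- the main invariant: A's scan from position i equals B's jump pass with cursor i
theorem solLoop_eq_aux (L : List Char) : ∀ (n i : Nat) (acc : Int),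
    L.length - i ≤ n →
    solLoopA L i acc = acc + solFB (i : Int) (solXs L) := by
  intro n
  induction n with
  | zero =>
    intro i acc hn
    rw [solLoopA]
    have hlt : ¬ i < L.length := by omega
    rw [dif_neg hlt]
    rw [solFB_skip_all (solXs_lt_len L (by omega))]
    omega
  | succ n ih =>
    intro i acc hn
    rw [solLoopA]
    by_cases hlt : i < L.length
    · rw [dif_pos hlt]
      by_cases hwin : 'X' ∈ PySem.List.slice L (some (i : Int)) (some ((i : Int) + 3))
      · rw [if_pos hwin]
        rw [ih (i + 3) (acc + 1) (by omega)]
        rw [solFB_step_hit (solXs_sorted L) ((solWindow_iff L i).mp hwin)]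
        push_cast
        ring
      · rw [if_neg hwin]
        rw [ih (i + 1) acc (by omega)]
        have hnone : ∀ p ∈ solXs L, p < (i : Int) ∨ (i : Int) + 3 ≤ p := by
          intro p hp
          by_contra hcon
          push_neg at hcon
          exact hwin ((solWindow_iff L i).mpr ⟨p, hp, by omega, by omega⟩)
        have hc : ((i + 1 : Nat) : Int) = (i : Int) + 1 := by push_cast; ring
        rw [hc, ← solFB_step_empty hnone]
    · rw [dif_neg hlt]
      rw [solFB_skip_all (solXs_lt_len L (by omega))]
      omega

theorem solLoop_eq (L : List Char) (i : Nat) (acc : Int) :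
    solLoopA L i acc = acc + solFB (i : Int) (solXs L) :=
  solLoop_eq_aux L (L.length - i) i acc le_rfl

-- ===== VERDICT (by name: the statement is the Claim_ definition above) =====
theorem solution_spec : Claim_equal_solution := by
  intro S _
  unfold Spec_solution solution solution_alt
  simp only
  split_ifs
  · rw [solFB_foldl, solLoop_eq]
    norm_num
  · rfl
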